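-- pv_equiv track=rewrite | github.com/ArikSenderovich1983/WFLO_Instances | WFLO_GUROBI.py | calc_location
-- ===== SOURCE A (Python) =====
-- def calc_location(axis_, step):
--     location_x = []
--     location_y = []
--     for x in range(0, axis_):
--         for y in range(0, axis_):
--             location_x.append(x * step)
--             location_y.append(y * step)
--     return location_x, location_y
-- ===== SOURCE B (Python) =====
-- # B precomputes one row of coordinates and builds both lists by repetition instead of the nested append loop (simpler; same cost).
-- def calc_location(axis_, step):
--     row = [y * step for y in range(axis_)]
--     location_x = [v for v in row for _ in range(axis_)]
--     location_y = row * axis_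
--     return location_x, location_y
-- ===== Notes on version B (the rewrite author's own statement) =====
-- stated objective: simpler
-- what changed: Replaces the nested append loop with a precomputed single row of coordinates, producing location_y by list repetition (row * axis_) and location_x by repeating each row element axis_ times.
import Mathlib
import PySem

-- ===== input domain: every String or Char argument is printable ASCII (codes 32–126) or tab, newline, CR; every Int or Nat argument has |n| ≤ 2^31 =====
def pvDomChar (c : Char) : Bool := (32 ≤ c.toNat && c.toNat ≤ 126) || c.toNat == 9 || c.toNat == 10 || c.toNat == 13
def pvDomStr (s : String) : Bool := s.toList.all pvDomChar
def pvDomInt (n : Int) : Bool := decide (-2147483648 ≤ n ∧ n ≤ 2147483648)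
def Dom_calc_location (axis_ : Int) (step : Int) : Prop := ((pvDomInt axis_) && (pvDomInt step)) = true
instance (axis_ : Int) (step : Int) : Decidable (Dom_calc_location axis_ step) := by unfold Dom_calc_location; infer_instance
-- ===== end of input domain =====

-- B precomputes one row of coordinates and builds both lists by repetition instead of A's nested append loop (objective: simpler; same cost).


-- ===== PORT A =====
def calc_location (axis_ : Int) (step : Int) : List Int × List Int :=
  (PySem.List.pyRange 0 axis_ 1).foldl (fun acc x =>
    (PySem.List.pyRange 0 axis_ 1).foldl (fun acc2 y =>
      (acc2.1 ++ [x * step], acc2.2 ++ [y * step])) acc)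
    (([] : List Int), ([] : List Int))

-- ===== PORT B =====
def calc_location_alt (axis_ : Int) (step : Int) : List Int × List Int :=
  let row := (PySem.List.pyRange 0 axis_ 1).map (fun y => y * step)
  let location_x := row.flatMap (fun v => List.replicate axis_.toNat v)
  let location_y := (List.replicate axis_.toNat row).flatten
  (location_x, location_y)

-- ===== PRECONDITION & SPEC =====
def Spec_calc_location (axis_ : Int) (step : Int) (out : List Int × List Int) : Prop := out = calc_location_alt axis_ step
instance (axis_ : Int) (step : Int) (out : List Int × List Int) : Decidable (Spec_calc_location axis_ step out) := by unfold Spec_calc_location; infer_instance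

-- ===== CLAIM (what is proved, stated in full; the proofs are below) =====
def Claim_equal_calc_location : Prop := ∀ (axis_ : Int) (step : Int), Dom_calc_location axis_ step → Spec_calc_location axis_ step (calc_location axis_ step)

-- ===== LEMMAS AND PROOFS =====

-- inner loop of A: appends x*step to the left list |ys| times and ys.map (·*step) to the right list
theorem calc_inner (ys : List Int) (x s : Int) (a b : List Int) :
    ys.foldl (fun acc2 y => (acc2.1 ++ [x * s], acc2.2 ++ [y * s])) (a, b)
      = (a ++ List.replicate ys.length (x * s), b ++ ys.map (fun y => y * s)) := by
  induction ys generalizing a b with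
  | nil => simp
  | cons y ys ih =>
      simp [List.foldl_cons, ih, List.replicate_succ, List.append_assoc]

-- outer loop of A in closed form
theorem calc_outer (xs ys : List Int) (s : Int) (a b : List Int) :
    xs.foldl (fun acc x => ys.foldl (fun acc2 y => (acc2.1 ++ [x * s], acc2.2 ++ [y * s])) acc) (a, b)
      = (a ++ xs.flatMap (fun x => List.replicate ys.length (x * s)),
         b ++ (List.replicate xs.length (ys.map (fun y => y * s))).flatten) := by
  induction xs generalizing a b with
  | nil => simp
  | cons x xs ih =>
      simp [calc_inner, ih, List.replicate_succ, List.append_assoc]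

-- ===== VERDICT (by name: the statement is the Claim_ definition above) =====
theorem calc_location_spec : Claim_equal_calc_location := by
  intro axis_ step _
  unfold Spec_calc_location calc_location calc_location_alt
  rw [calc_outer]
  simp [PySem.List.length_pyRange_one, List.flatMap_map]
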